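-- pv_equiv track=rewrite | github.com/Sachitk01/hithonix-recruitment-automation | chat_parsers.py | _strip_bot_noise
-- ===== SOURCE A (Python) =====
-- NOISE_PREFIXES = [
--     "hey riva",
--     "hi riva",
--     "hello riva",
--     "riva",
--     "hey arjun",
--     "hi arjun",
--     "hello arjun",
--     "arjun",
--     "can you",
--     "can u",
--     "please",
--     "plz",
-- ]
--
-- def _strip_bot_noise(text: str) -> str:
--     if not text:
--         return ""
--
--     working = text.strip()
--     while working:
--         lowered = working.lower()
--         matched = False
--         for prefix in NOISE_PREFIXES:
--             if lowered.startswith(prefix):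
--                 working = working[len(prefix):].lstrip()
--                 matched = True
--                 break
--         if not matched:
--             break
--     return working
-- ===== SOURCE B (Python) =====
-- NOISE_PREFIXES = [
--     "hey riva",
--     "hi riva",
--     "hello riva",
--     "riva",
--     "hey arjun",
--     "hi arjun",
--     "hello arjun",
--     "arjun",
--     "can you",
--     "can u",
--     "please",
--     "plz",
-- ]
--
-- def _strip_bot_noise(text: str) -> str:
--     # Single-pass index walk: lowercase once, advance a cursor past each
--     # matched prefix and the following whitespace, then slice once at the end.
--     if not text:
--         return ""
--     s = text.strip()
--     low = s.lower()
--     n = len(s)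
--     i = 0
--     while True:
--         for prefix in NOISE_PREFIXES:
--             if low.startswith(prefix, i):
--                 i += len(prefix)
--                 while i < n and s[i].isspace():
--                     i += 1
--                 break
--         else:
--             return s[i:]
-- ===== Notes on version B (the rewrite author's own statement) =====
-- stated objective: alternative
-- what changed: Replaces the rebuild-per-iteration loop (re-lowercasing and re-slicing the whole remaining string after every stripped prefix) with a single lowercase pass and an integer cursor that walks past prefixes and whitespace, slicing once at the end.
import Mathlib
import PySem

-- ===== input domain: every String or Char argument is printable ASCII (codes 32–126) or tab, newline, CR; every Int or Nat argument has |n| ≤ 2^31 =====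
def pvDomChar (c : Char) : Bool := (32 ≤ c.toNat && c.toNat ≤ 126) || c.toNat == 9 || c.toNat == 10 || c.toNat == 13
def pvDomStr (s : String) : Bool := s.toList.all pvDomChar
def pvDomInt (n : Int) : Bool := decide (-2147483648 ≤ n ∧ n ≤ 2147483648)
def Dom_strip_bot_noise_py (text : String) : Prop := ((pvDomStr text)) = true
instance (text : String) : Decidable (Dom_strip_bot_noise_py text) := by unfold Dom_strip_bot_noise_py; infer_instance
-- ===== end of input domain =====

-- B replaces A's rebuild-per-iteration loop (re-lowercase + re-slice after every stripped
-- prefix) with one lowercase pass and an integer cursor, slicing once at the end.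

-- ===== PORT A =====
-- NOISE_PREFIXES, in source order
def noisePrefixes : List (List Char) :=
  ["hey riva".toList, "hi riva".toList, "hello riva".toList, "riva".toList,
   "hey arjun".toList, "hi arjun".toList, "hello arjun".toList, "arjun".toList,
   "can you".toList, "can u".toList, "please".toList, "plz".toList]

-- every noise prefix is nonempty (used by the ports' termination proofs)
theorem noisePrefixes_len : ∀ p ∈ noisePrefixes, 1 ≤ p.length := by decide

-- A's while-loop: each iteration lowers the whole remaining text, scans the prefixes for the
-- first match (the for/break), slices it off ('working[len(prefix):]' with a nonnegative index
-- is List.drop) and lstrips; no match (or empty) exits the loop.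
def aLoop (working : List Char) : List Char :=
  if working.isEmpty then working
  else
    match hf : noisePrefixes.find? (fun p => PySem.Chars.startswith (PySem.Chars.lower working) p) with
    | some p => aLoop (PySem.Chars.lstrip (working.drop p.length))
    | none => working
termination_by working.length
decreasing_by
  have hp := noisePrefixes_len p (List.mem_of_find?_eq_some hf)
  have hw : working ≠ [] := by simpa using ‹¬ working.isEmpty = true›
  have h0 : 0 < working.length := List.length_pos_iff.mpr hw
  have hle := List.length_dropWhile_le (p := PySem.Chars.isspace) (l := working.drop p.length)
  simp only [PySem.Chars.lstrip, List.length_drop] at *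
  omega

def strip_bot_noise_py (text : String) : String :=
  if text.toList = [] then ""
  else String.ofList (aLoop (PySem.Chars.strip text.toList))

-- ===== PORT B =====
-- the inner 'while i < n and s[i].isspace(): i += 1' walk of Source B
def skipWs (s : List Char) (i : Nat) : Nat :=
  if h : i < s.length then
    if PySem.Chars.isspace s[i] then skipWs s (i + 1) else i
  else i
termination_by s.length - i

-- i ≤ skipWs s i (used by bLoop's termination proof)
theorem skipWs_ge (s : List Char) (i : Nat) : i ≤ skipWs s i := by
  fun_induction skipWs with
  | case1 => omega
  | case2 => omega
  | case3 => omega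

-- Python's low.startswith(p, i): prefix test against the suffix of low at i (exact for 0 ≤ i)
def startsAt (low p : List Char) (i : Nat) : Bool :=
  PySem.Chars.startswith (low.drop i) p

-- Source B's outer 'while True' cursor loop: find the first prefix matching at i (the for/else),
-- advance the cursor past it and the following whitespace; no match returns the cursor.
def bLoop (s low : List Char) (i : Nat) : Nat :=
  match hf : noisePrefixes.find? (fun p => startsAt low p i) with
  | some p => bLoop s low (skipWs s (i + p.length))
  | none => i
termination_by low.length - i
decreasing_by
  have hp := noisePrefixes_len p (List.mem_of_find?_eq_some hf)
  have hpre : (PySem.Chars.startswith (low.drop i) p) = true := by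
    simpa [startsAt] using List.find?_some hf
  have hne : low.drop i ≠ [] := by
    intro h
    rw [h] at hpre
    simp [PySem.Chars.startswith] at hpre
    cases p with
    | nil => simp at hp
    | cons c cs => simp at hpre
  have hi : i < low.length := by
    by_contra h
    exact hne (List.drop_eq_nil_of_le (by omega))
  have := skipWs_ge s (i + p.length)
  omega

def strip_bot_noise_py_alt (text : String) : String :=
  if text.toList = [] then ""
  else
    let s := PySem.Chars.strip text.toList
    let low := PySem.Chars.lower s
    String.ofList (s.drop (bLoop s low 0))

-- ===== PRECONDITION & SPEC =====
def Spec_strip_bot_noise_py (text : String) (out : String) : Prop := out = strip_bot_noise_py_alt text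
instance (text : String) (out : String) : Decidable (Spec_strip_bot_noise_py text out) := by unfold Spec_strip_bot_noise_py; infer_instance

-- ===== CLAIM (what is proved, stated in full; the proofs are below) =====
def Claim_equal_strip_bot_noise_py : Prop := ∀ (text : String), Dom_strip_bot_noise_py text → Spec_strip_bot_noise_py text (strip_bot_noise_py text)

-- ===== LEMMAS AND PROOFS =====

theorem skipWs_drop (s : List Char) (i : Nat) :
    s.drop (skipWs s i) = List.dropWhile PySem.Chars.isspace (s.drop i) := by
  fun_induction skipWs with
  | case1 i h hsp ih =>
      rw [ih, List.drop_eq_getElem_cons h, List.dropWhile_cons_of_pos hsp]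
  | case2 i h hsp =>
      rw [List.drop_eq_getElem_cons h, List.dropWhile_cons_of_neg (by simpa using hsp)]
  | case3 i h =>
      rw [List.drop_eq_nil_of_le (by omega)]
      simp

theorem lower_drop (s : List Char) (i : Nat) :
    PySem.Chars.lower (s.drop i) = (PySem.Chars.lower s).drop i := by
  simp [PySem.Chars.lower, List.map_drop]

theorem main_loop (s : List Char) (i : Nat) :
    aLoop (s.drop i) = s.drop (bLoop s (PySem.Chars.lower s) i) := by
  generalize hk : s.length - i = k
  induction k using Nat.strong_induction_on generalizing i with
  | _ k ih =>
  have hdroplow : (PySem.Chars.lower s).drop i = PySem.Chars.lower (s.drop i) :=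
    (lower_drop s i).symm
  rw [aLoop, bLoop]
  by_cases hemp : (s.drop i).isEmpty
  · -- remaining text empty: A exits the while; B finds no prefix and returns the cursor
    have hnil : s.drop i = [] := by simpa [List.isEmpty_iff] using hemp
    have hfind : noisePrefixes.find? (fun p => startsAt (PySem.Chars.lower s) p i) = none := by
      apply List.find?_eq_none.mpr
      intro p hp
      have hlen := noisePrefixes_len p hp
      simp only [startsAt, hdroplow, hnil]
      cases p with
      | nil => simp at hlen
      | cons c cs => simp [PySem.Chars.lower, PySem.Chars.startswith]
    rw [hfind]
    simp [hnil]
  · rw [if_neg hemp]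
    have hpredeq : (fun p => PySem.Chars.startswith (PySem.Chars.lower (s.drop i)) p)
        = (fun p => startsAt (PySem.Chars.lower s) p i) := by
      funext p
      simp [startsAt, hdroplow]
    rw [hpredeq]
    cases hfind : noisePrefixes.find? (fun p => startsAt (PySem.Chars.lower s) p i) with
    | none => simp
    | some p =>
      simp only
      have hp := noisePrefixes_len p (List.mem_of_find?_eq_some hfind)
      have hi : i < s.length := by
        by_contra h
        exact absurd (by simp [List.drop_eq_nil_of_le (by omega : s.length ≤ i)]) hemp
      have hdd : (s.drop i).drop p.length = s.drop (i + p.length) := by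
        rw [List.drop_drop, Nat.add_comm]
      have hstep : PySem.Chars.lstrip ((s.drop i).drop p.length)
          = s.drop (skipWs s (i + p.length)) := by
        rw [hdd, PySem.Chars.lstrip, skipWs_drop]
      rw [hstep]
      exact ih (s.length - skipWs s (i + p.length)) (by have := skipWs_ge s (i + p.length); omega)
        (skipWs s (i + p.length)) rfl

-- ===== VERDICT (by name: the statement is the Claim_ definition above) =====
theorem strip_bot_noise_py_spec : Claim_equal_strip_bot_noise_py := by
  intro text _
  unfold Spec_strip_bot_noise_py strip_bot_noise_py strip_bot_noise_py_alt
  by_cases h : text.toList = []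
  · simp [h]
  · rw [if_neg h, if_neg h]
    have := main_loop (PySem.Chars.strip text.toList) 0
    rw [List.drop_zero] at this
    exact congrArg String.ofList this
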